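-- pv_equiv track=rewrite | github.com/jun-uen0/leetcode | 1.easy/number-of-valid-words-in-a-sentence.py | notValidMark
-- ===== SOURCE A (Python) =====
-- def notValidMark(token: str) -> bool:
--   marks = ["!", ".", ","]
--   marks_cnt = 0
--   one_mark = ""
--
--   for mark in marks:
--     if token.find(mark) != -1:
--       marks_cnt += 1
--       one_mark = mark
--
--   if marks_cnt == 0:
--     return False
--   if marks_cnt > 1:
--     return True
--
--   if token.index(one_mark) != len(token) - 1:
--     return True
--
--   return False
-- ===== SOURCE B (Python) =====
-- def notValidMark(token: str) -> bool:
--     marks = {'!', '.', ','}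
--     cnt = 0
--     last_at_end = False
--     n = len(token)
--     for i, ch in enumerate(token):
--         if ch in marks:
--             cnt += 1
--             last_at_end = (i == n - 1)
--     if cnt == 0:
--         return False
--     if cnt > 1:
--         return True
--     return not last_at_end
-- ===== Notes on version B (the rewrite author's own statement) =====
-- stated objective: alternative
-- what changed: Replaces A's three per-mark find scans plus a final index scan with a single character pass over the token that keeps a total punctuation count and whether the most recent punctuation character sits at the last index.
import Mathlib
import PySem

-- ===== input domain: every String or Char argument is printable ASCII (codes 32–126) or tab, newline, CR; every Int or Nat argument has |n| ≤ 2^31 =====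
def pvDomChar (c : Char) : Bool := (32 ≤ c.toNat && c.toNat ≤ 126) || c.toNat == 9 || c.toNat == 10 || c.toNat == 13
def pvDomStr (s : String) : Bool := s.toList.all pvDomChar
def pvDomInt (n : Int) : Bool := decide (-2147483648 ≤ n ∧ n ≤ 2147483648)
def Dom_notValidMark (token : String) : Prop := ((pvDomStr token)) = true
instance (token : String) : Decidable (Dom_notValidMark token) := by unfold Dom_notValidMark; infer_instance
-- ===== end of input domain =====

-- B replaces A's three per-mark find scans (plus a final index scan) by ONE pass over the
-- characters, keeping a total punctuation count and whether the most recent punctuation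
-- character sits at the last index; objective: alternative decomposition (not claimed faster).

-- ===== PORT A =====
-- 'token.index(one_mark)' is only reached when marks_cnt == 1, i.e. one_mark was found in
-- token; there str.index returns exactly what str.find returns, so it is ported as Str.find.
def notValidMark (token : String) : Bool :=
  let marks : List String := ["!", ".", ","]
  let st := marks.foldl
    (fun (acc : Int × String) mark =>
      if PySem.Str.find token mark != -1 then (acc.1 + 1, mark) else acc)
    (0, "")
  if st.1 = 0 then false
  else if st.1 > 1 then true
  else if PySem.Str.find token st.2 != PySem.Str.len token - 1 then true
  else false

-- ===== PORT B =====
def pvMarks : List Char := PySem.Set.ofList ['!', '.', ',']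

def pvStep (n : Int) (acc : Int × Bool) (p : Int × Char) : Int × Bool :=
  if p.2 ∈ pvMarks then (acc.1 + 1, decide (p.1 = n - 1)) else acc

def notValidMark_alt (token : String) : Bool :=
  let n := PySem.Str.len token
  let st := (PySem.List.enumerate token.toList 0).foldl (pvStep n) (0, false)
  if st.1 = 0 then false
  else if st.1 > 1 then true
  else !st.2

-- ===== PRECONDITION & SPEC =====
def Spec_notValidMark (token : String) (out : Bool) : Prop := out = notValidMark_alt token
instance (token : String) (out : Bool) : Decidable (Spec_notValidMark token out) := by unfold Spec_notValidMark; infer_instance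

-- ===== CLAIM (what is proved, stated in full; the proofs are below) =====
def Claim_equal_notValidMark : Prop := ∀ (token : String), Dom_notValidMark token → Spec_notValidMark token (notValidMark token)

-- ===== LEMMAS AND PROOFS =====

-- the Bool form of membership in the mark set
def pvP (c : Char) : Bool := decide (c ∈ pvMarks)

theorem mem_pvMarks (c : Char) : c ∈ pvMarks ↔ c = '!' ∨ c = '.' ∨ c = ',' := by
  simp [pvMarks, PySem.Set.mem_ofList]

theorem pvStep_of_neg (n : Int) (acc : Int × Bool) (p : Int × Char) (h : pvP p.2 = false) :
    pvStep n acc p = acc := by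
  unfold pvStep
  rw [if_neg]
  simpa [pvP] using h

theorem pvStep_of_pos (n : Int) (acc : Int × Bool) (p : Int × Char) (h : pvP p.2 = true) :
    pvStep n acc p = (acc.1 + 1, decide (p.1 = n - 1)) := by
  unfold pvStep
  rw [if_pos]
  simpa [pvP] using h

theorem countP_cons_true (x : Char) (t : List Char) (hx : pvP x = true) :
    (x :: t).countP pvP = t.countP pvP + 1 := by
  rw [List.countP_cons, hx]
  simp

theorem countP_cons_false (x : Char) (t : List Char) (hx : pvP x = false) :
    (x :: t).countP pvP = t.countP pvP := by
  rw [List.countP_cons, hx]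
  simp

theorem fold_count0 (n : Int) (s : List Char) (start : Int) (acc : Int × Bool)
    (h : s.countP pvP = 0) :
    (PySem.List.enumerate s start).foldl (pvStep n) acc = acc := by
  induction s generalizing start acc with
  | nil => simp [PySem.List.enumerate_nil]
  | cons x t ih =>
      cases hx : pvP x with
      | true => rw [countP_cons_true x t hx] at h; omega
      | false =>
          rw [countP_cons_false x t hx] at h
          rw [PySem.List.enumerate_cons, List.foldl_cons, pvStep_of_neg n acc (start, x) hx]
          exact ih (start + 1) acc (by omega)

theorem fold_fst (n : Int) (s : List Char) (start : Int) (acc : Int × Bool) :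
    ((PySem.List.enumerate s start).foldl (pvStep n) acc).1 = acc.1 + s.countP pvP := by
  induction s generalizing start acc with
  | nil => simp [PySem.List.enumerate_nil]
  | cons x t ih =>
      rw [PySem.List.enumerate_cons, List.foldl_cons]
      cases hx : pvP x with
      | false =>
          rw [countP_cons_false x t hx, pvStep_of_neg n acc (start, x) hx,
            ih (start + 1) acc]
      | true =>
          rw [countP_cons_true x t hx, pvStep_of_pos n acc (start, x) hx,
            ih (start + 1) (acc.1 + 1, decide (start = n - 1))]
          omega

theorem fold_snd_one (n : Int) (s : List Char) (start : Int) (acc : Int × Bool)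
    (h : s.countP pvP = 1) :
    ((PySem.List.enumerate s start).foldl (pvStep n) acc).2 =
      decide (start + (s.findIdx pvP : Int) = n - 1) := by
  induction s generalizing start acc with
  | nil => simp at h
  | cons x t ih =>
      rw [PySem.List.enumerate_cons, List.foldl_cons]
      cases hx : pvP x with
      | true =>
          rw [countP_cons_true x t hx] at h
          rw [pvStep_of_pos n acc (start, x) hx, fold_count0 n t (start + 1) _ (by omega)]
          simp [List.findIdx_cons, hx]
      | false =>
          rw [countP_cons_false x t hx] at h
          rw [pvStep_of_neg n acc (start, x) hx, ih (start + 1) acc (by omega)]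
          simp only [List.findIdx_cons, hx, cond_false]
          rw [decide_eq_decide]
          push_cast
          omega

-- full evaluation of B as a closed form over the character list
theorem alt_eval (token : String) :
    notValidMark_alt token =
      (if token.toList.countP pvP = 0 then false
       else if 1 < token.toList.countP pvP then true
       else !decide ((token.toList.findIdx pvP : Int) = (token.toList.length : Int) - 1)) := by
  simp only [notValidMark_alt, PySem.Str.len_eq]
  have hfst := fold_fst (token.toList.length : Int) token.toList 0 (0, false)
  rcases Nat.lt_trichotomy (token.toList.countP pvP) 1 with h0 | h1 | h2
  · have hk : token.toList.countP pvP = 0 := by omega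
    rw [fold_count0 _ _ _ _ hk]
    simp [hk]
  · have hsnd := fold_snd_one (token.toList.length : Int) token.toList 0 (0, false) h1
    simp only [hfst, hsnd, h1]
    norm_num
  · simp only [hfst]
    rw [if_neg (by omega), if_pos (by omega), if_neg (by omega), if_pos h2]

theorem singleton_infix_mem (c : Char) (l : List Char) : [c] <:+: l ↔ c ∈ l := by
  constructor
  · intro h
    exact List.singleton_sublist.mp h.sublist
  · intro h
    obtain ⟨u, v, rfl⟩ := List.append_of_mem h
    exact ⟨u, v, by simp⟩

theorem singleton_prefix_drop (c : Char) (s : List Char) (k : Nat) :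
    [c] <+: s.drop k ↔ s[k]? = some c := by
  constructor
  · rintro ⟨r, hr⟩
    have : (s.drop k).head? = some c := by rw [← hr]; rfl
    rwa [List.head?_drop] at this
  · intro h
    rw [List.getElem?_eq_some_iff] at h
    obtain ⟨hk, hv⟩ := h
    refine ⟨s.drop (k + 1), ?_⟩
    rw [List.singleton_append]
    conv_rhs => rw [List.drop_eq_getElem_cons hk]
    rw [hv]

theorem find_singleton (c : Char) (s : List Char) (h : c ∈ s) :
    PySem.Chars.find s [c] = (s.findIdx (· == c) : Int) := by
  have hinf : [c] <:+: s := (singleton_infix_mem c s).mpr h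
  have hnn : 0 ≤ PySem.Chars.find s [c] := (PySem.Chars.find_nonneg_iff s [c]).mpr hinf
  obtain ⟨hpre, hmin⟩ := PySem.Chars.find_spec hnn
  set f := PySem.Chars.find s [c] with hf
  set j := s.findIdx (· == c) with hj
  have hjlt : j < s.length := List.findIdx_lt_length_of_exists ⟨c, h, by simp⟩
  have hgetf := (singleton_prefix_drop c s f.toNat).mp hpre
  rw [List.getElem?_eq_some_iff] at hgetf
  obtain ⟨hflt, hfv⟩ := hgetf
  have h1 : ¬ f.toNat < j := by
    intro hlt
    obtain ⟨_, hall⟩ := (List.lt_findIdx_iff s (· == c) f.toNat).mp hlt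
    have := hall f.toNat (le_refl _)
    simp [hfv] at this
  have h2 : ¬ j < f.toNat := by
    intro hlt
    apply hmin j hlt
    rw [singleton_prefix_drop, List.getElem?_eq_some_iff]
    exact ⟨hjlt, by simpa using (List.findIdx_getElem (w := hjlt))⟩
  omega

theorem find_singleton_absent (c : Char) (s : List Char) (h : c ∉ s) :
    PySem.Chars.find s [c] = -1 := by
  rw [PySem.Chars.find_eq_neg_one_iff, singleton_infix_mem]
  exact h

theorem findIdx_congr_mem (p q : Char → Bool) (s : List Char)
    (h : ∀ x ∈ s, p x = q x) : s.findIdx p = s.findIdx q := by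
  induction s with
  | nil => rfl
  | cons x t ih =>
      rw [List.findIdx_cons, List.findIdx_cons, h x List.mem_cons_self,
        ih (fun y hy => h y (List.mem_cons_of_mem x hy))]

theorem two_le_length (a b : Char) (l : List Char) (ha : a ∈ l) (hb : b ∈ l) (hab : a ≠ b) :
    2 ≤ l.length := by
  cases l with
  | nil => simp at ha
  | cons x t =>
      cases t with
      | nil =>
          simp at ha hb
          exact absurd (ha.trans hb.symm) hab
      | cons y u => simp

theorem two_le_countP (p : Char → Bool) (a b : Char) (l : List Char)
    (ha : a ∈ l) (hb : b ∈ l) (hab : a ≠ b) (hpa : p a = true) (hpb : p b = true) :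
    2 ≤ l.countP p := by
  rw [List.countP_eq_length_filter]
  exact two_le_length a b (l.filter p)
    (List.mem_filter.mpr ⟨ha, hpa⟩) (List.mem_filter.mpr ⟨hb, hpb⟩) hab

theorem two_le_findIdx_lt (p : Char → Bool) (l : List Char) (h : 2 ≤ l.countP p) :
    l.findIdx p + 1 < l.length := by
  induction l with
  | nil => simp at h
  | cons x t ih =>
      rw [List.findIdx_cons]
      cases hx : p x with
      | true =>
          have hxif : (if p x = true then 1 else 0) = 1 := by simp [hx]
          rw [List.countP_cons, hxif] at h
          have hlen : 1 ≤ t.length := le_trans (by omega) (List.countP_le_length (p := p) (l := t))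
          simp
          omega
      | false =>
          have hxif : (if p x = true then 1 else 0) = 0 := by simp [hx]
          rw [List.countP_cons, hxif] at h
          have := ih (by omega)
          simp
          omega

-- B's closed form in the single-mark-type case equals A's tail expression
theorem single_mark_eval (s : List Char) (c : Char) (hc : c ∈ pvMarks) (hmem : c ∈ s)
    (hall : ∀ x ∈ s, x ∈ pvMarks → x = c) :
    (if s.countP pvP = 0 then false
     else if 1 < s.countP pvP then true
     else !decide ((s.findIdx pvP : Int) = (s.length : Int) - 1)) =
    (if PySem.Chars.find s [c] != (s.length : Int) - 1 then true else false) := by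
  have hpq : ∀ x ∈ s, pvP x = (x == c) := by
    intro x hx
    cases hxc : (x == c) with
    | true => simp [pvP, beq_iff_eq.mp hxc, hc]
    | false =>
        simp only [pvP, decide_eq_false_iff_not]
        intro hxm
        exact absurd (beq_iff_eq.mpr (hall x hx hxm)) (by simp [hxc])
  have hcount : s.countP pvP = s.count c := by
    rw [List.count_eq_countP]
    exact List.countP_congr (fun x hx => by rw [hpq x hx])
  have hidx : s.findIdx pvP = s.findIdx (· == c) := findIdx_congr_mem _ _ s hpq
  have hfind := find_singleton c s hmem
  have hk1 : 1 ≤ s.countP pvP := by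
    rw [hcount]; exact List.one_le_count_iff.mpr hmem
  rcases Nat.lt_or_ge 1 (s.countP pvP) with h2 | h1
  · -- at least two punctuation chars, all equal to c: the first one is strictly before the end
    have h2' : 2 ≤ s.countP (· == c) := by
      rw [← List.count_eq_countP, ← hcount]; omega
    have hlt := two_le_findIdx_lt (· == c) s h2'
    rw [if_neg (by omega), if_pos h2, hfind]
    have hne : ((s.findIdx (· == c) : Int)) ≠ (s.length : Int) - 1 := by omega
    simp [hne]
  · rw [if_neg (by omega), if_neg (by omega), hfind]
    simp only [hidx]
    by_cases hd : ((s.findIdx (· == c) : Int)) = (s.length : Int) - 1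
    · simp [hd]
    · simp [hd]

theorem countP_zero_of_none (s : List Char) (h1 : '!' ∉ s) (h2 : '.' ∉ s) (h3 : ',' ∉ s) :
    s.countP pvP = 0 := by
  rw [List.countP_eq_zero]
  intro x hx
  simp only [pvP, decide_eq_true_eq, mem_pvMarks]
  rintro (rfl | rfl | rfl)
  · exact h1 hx
  · exact h2 hx
  · exact h3 hx

-- ===== VERDICT (by name: the statement is the Claim_ definition above) =====
theorem notValidMark_spec : Claim_equal_notValidMark := by
  intro token _
  unfold Spec_notValidMark
  rw [alt_eval]
  have hbl : ("!").toList = ['!'] := rfl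
  have hdl : (".").toList = ['.'] := rfl
  have hcl : (",").toList = [','] := rfl
  by_cases h1 : '!' ∈ token.toList <;> by_cases h2 : '.' ∈ token.toList <;>
    by_cases h3 : ',' ∈ token.toList
  · -- ! . ,
    have e1 : ¬ (PySem.Chars.find token.toList ['!'] = -1) := by rw [find_singleton _ _ h1]; omega
    have e2 : ¬ (PySem.Chars.find token.toList ['.'] = -1) := by rw [find_singleton _ _ h2]; omega
    have e3 : ¬ (PySem.Chars.find token.toList [','] = -1) := by rw [find_singleton _ _ h3]; omega
    have hk2 := two_le_countP pvP '!' '.' token.toList h1 h2 (by decide) (by decide) (by decide)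
    rw [if_neg (by omega), if_pos (by omega)]
    simp [notValidMark, e1, e2, e3, hbl, hdl, hcl]
  · -- ! .
    have e1 : ¬ (PySem.Chars.find token.toList ['!'] = -1) := by rw [find_singleton _ _ h1]; omega
    have e2 : ¬ (PySem.Chars.find token.toList ['.'] = -1) := by rw [find_singleton _ _ h2]; omega
    have e3 : PySem.Chars.find token.toList [','] = -1 := find_singleton_absent _ _ h3
    have hk2 := two_le_countP pvP '!' '.' token.toList h1 h2 (by decide) (by decide) (by decide)
    rw [if_neg (by omega), if_pos (by omega)]
    simp [notValidMark, e1, e2, e3, hbl, hdl, hcl]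
  · -- ! ,
    have e1 : ¬ (PySem.Chars.find token.toList ['!'] = -1) := by rw [find_singleton _ _ h1]; omega
    have e2 : PySem.Chars.find token.toList ['.'] = -1 := find_singleton_absent _ _ h2
    have e3 : ¬ (PySem.Chars.find token.toList [','] = -1) := by rw [find_singleton _ _ h3]; omega
    have hk2 := two_le_countP pvP '!' ',' token.toList h1 h3 (by decide) (by decide) (by decide)
    rw [if_neg (by omega), if_pos (by omega)]
    simp [notValidMark, e1, e2, e3, hbl, hdl, hcl]
  · -- only !
    have e1 : ¬ (PySem.Chars.find token.toList ['!'] = -1) := by rw [find_singleton _ _ h1]; omega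
    have e2 : PySem.Chars.find token.toList ['.'] = -1 := find_singleton_absent _ _ h2
    have e3 : PySem.Chars.find token.toList [','] = -1 := find_singleton_absent _ _ h3
    have hall : ∀ x ∈ token.toList, x ∈ pvMarks → x = '!' := by
      intro x hx hxm
      rcases (mem_pvMarks x).mp hxm with rfl | rfl | rfl
      · rfl
      · exact absurd hx h2
      · exact absurd hx h3
    rw [single_mark_eval token.toList '!' (by decide) h1 hall]
    simp [notValidMark, e1, e2, e3, hbl, hdl, hcl]
  · -- . ,
    have e1 : PySem.Chars.find token.toList ['!'] = -1 := find_singleton_absent _ _ h1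
    have e2 : ¬ (PySem.Chars.find token.toList ['.'] = -1) := by rw [find_singleton _ _ h2]; omega
    have e3 : ¬ (PySem.Chars.find token.toList [','] = -1) := by rw [find_singleton _ _ h3]; omega
    have hk2 := two_le_countP pvP '.' ',' token.toList h2 h3 (by decide) (by decide) (by decide)
    rw [if_neg (by omega), if_pos (by omega)]
    simp [notValidMark, e1, e2, e3, hbl, hdl, hcl]
  · -- only .
    have e1 : PySem.Chars.find token.toList ['!'] = -1 := find_singleton_absent _ _ h1
    have e2 : ¬ (PySem.Chars.find token.toList ['.'] = -1) := by rw [find_singleton _ _ h2]; omega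
    have e3 : PySem.Chars.find token.toList [','] = -1 := find_singleton_absent _ _ h3
    have hall : ∀ x ∈ token.toList, x ∈ pvMarks → x = '.' := by
      intro x hx hxm
      rcases (mem_pvMarks x).mp hxm with rfl | rfl | rfl
      · exact absurd hx h1
      · rfl
      · exact absurd hx h3
    rw [single_mark_eval token.toList '.' (by decide) h2 hall]
    simp [notValidMark, e1, e2, e3, hbl, hdl, hcl]
  · -- only ,
    have e1 : PySem.Chars.find token.toList ['!'] = -1 := find_singleton_absent _ _ h1
    have e2 : PySem.Chars.find token.toList ['.'] = -1 := find_singleton_absent _ _ h2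
    have e3 : ¬ (PySem.Chars.find token.toList [','] = -1) := by rw [find_singleton _ _ h3]; omega
    have hall : ∀ x ∈ token.toList, x ∈ pvMarks → x = ',' := by
      intro x hx hxm
      rcases (mem_pvMarks x).mp hxm with rfl | rfl | rfl
      · exact absurd hx h1
      · exact absurd hx h2
      · rfl
    rw [single_mark_eval token.toList ',' (by decide) h3 hall]
    simp [notValidMark, e1, e2, e3, hbl, hdl, hcl]
  · -- none
    have e1 : PySem.Chars.find token.toList ['!'] = -1 := find_singleton_absent _ _ h1
    have e2 : PySem.Chars.find token.toList ['.'] = -1 := find_singleton_absent _ _ h2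
    have e3 : PySem.Chars.find token.toList [','] = -1 := find_singleton_absent _ _ h3
    have hk := countP_zero_of_none token.toList h1 h2 h3
    simp [notValidMark, e1, e2, e3, hbl, hdl, hcl, hk]
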